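-- pv_equiv track=rewrite | github.com/kinzang20/ITS307 | ITP304/week_2/bitmasking.py | converttoBin
-- ===== SOURCE A (Python) =====
-- def converttoBin(n):
-- 	ans = 0
-- 	p = 1
--
-- 	while(n>0):
-- 		last_bit = n & 1
-- 		ans += last_bit * p
-- 		p= p * 10
-- 		n = n >> 1
--
-- 	return ans
-- ===== SOURCE B (Python) =====
-- def converttoBin(n):
--     return int(bin(n)[2:]) if n > 0 else 0
-- ===== Notes on version B (the rewrite author's own statement) =====
-- stated objective: idiomatic
-- what changed: B replaces A's arithmetic bit-extraction loop with decimal place-value accumulators by the builtin bin(): it formats n as a binary string, strips the '0b' prefix and reinterprets the digit string as a base-10 integer with int().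
import Mathlib
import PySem

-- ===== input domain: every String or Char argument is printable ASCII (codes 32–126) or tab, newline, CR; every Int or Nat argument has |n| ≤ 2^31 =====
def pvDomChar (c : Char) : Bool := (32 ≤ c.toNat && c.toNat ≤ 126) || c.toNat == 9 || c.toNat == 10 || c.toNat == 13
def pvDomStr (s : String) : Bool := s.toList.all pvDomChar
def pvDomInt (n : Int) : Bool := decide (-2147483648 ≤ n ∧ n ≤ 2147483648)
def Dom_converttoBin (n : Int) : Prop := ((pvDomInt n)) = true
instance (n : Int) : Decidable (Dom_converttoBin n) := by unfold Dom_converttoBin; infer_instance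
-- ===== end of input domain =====

-- B formats n in binary via bin()-style digit formatting and reparses the digit string in base 10,
-- replacing A's arithmetic bit-extraction loop; same behaviour, idiomatic rewrite (no speed claim).


-- ===== PORT A =====
-- the while loop of A, state (n, ans, p); decreases on n.toNat
def converttoBinGo (n ans p : Int) : Int :=
  if h : n > 0 then
    converttoBinGo (n >>> (1 : Nat)) (ans + (PySem.Int.band n 1) * p) (p * 10)
  else ans
termination_by n.toNat
decreasing_by
  simp only [Int.shiftRight_eq_div_pow, pow_one]
  omega

def converttoBin (n : Int) : Int := converttoBinGo n 0 1

-- ===== PORT B =====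
-- hand port of bin(m)[2:] for m > 0: the binary digit characters, most significant first
def binChars (m : Nat) : List Char :=
  if m = 0 then [] else binChars (m / 2) ++ [if m % 2 = 1 then '1' else '0']

-- hand port of int() on a nonempty all-digit string (exact there): standard base-10 digit fold
def parseDigits (s : List Char) : Int :=
  s.foldl (fun a c => a * 10 + ((c.toNat : Int) - 48)) 0

def converttoBin_alt (n : Int) : Int :=
  if n > 0 then parseDigits (binChars n.toNat) else 0

-- ===== PRECONDITION & SPEC =====
def Spec_converttoBin (n : Int) (out : Int) : Prop := out = converttoBin_alt n
instance (n : Int) (out : Int) : Decidable (Spec_converttoBin n out) := by unfold Spec_converttoBin; infer_instance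

-- ===== CLAIM (what is proved, stated in full; the proofs are below) =====
def Claim_equal_converttoBin : Prop := ∀ (n : Int), Dom_converttoBin n → Spec_converttoBin n (converttoBin n)

-- ===== LEMMAS AND PROOFS =====
theorem converttoBinGo_eq (m : Nat) : ∀ (ans p : Int),
    converttoBinGo (m : Int) ans p = ans + p * parseDigits (binChars m) := by
  induction m using Nat.strong_induction_on with
  | _ m ih =>
    intro ans p
    by_cases hm : m = 0
    · subst hm
      rw [converttoBinGo, binChars]
      simp [parseDigits]
    · have hpos : (0 : Int) < (m : Int) := by exact_mod_cast Nat.pos_of_ne_zero hm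
      rw [converttoBinGo]
      rw [dif_pos hpos]
      have hsh : ((m : Int) >>> (1 : Nat)) = ((m / 2 : Nat) : Int) := by
        rw [Int.shiftRight_eq_div_pow, pow_one]
        omega
      have hband : PySem.Int.band (m : Int) 1 = ((m % 2 : Nat) : Int) := by
        have := PySem.Int.band_natCast m 1
        simpa [Nat.and_one_is_mod] using this
      rw [hsh, hband, ih (m / 2) (by omega)]
      conv_rhs => rw [binChars, if_neg hm]
      simp only [parseDigits, List.foldl_append, List.foldl_cons, List.foldl_nil]
      rcases Nat.mod_two_eq_zero_or_one m with h2 | h2 <;>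
        simp [h2] <;> ring

-- ===== VERDICT (by name: the statement is the Claim_ definition above) =====
theorem converttoBin_spec : Claim_equal_converttoBin := by
  intro n _
  unfold Spec_converttoBin converttoBin converttoBin_alt
  by_cases h : n > 0
  · rw [if_pos h]
    have hn : ((n.toNat : Nat) : Int) = n := Int.toNat_of_nonneg (le_of_lt h)
    calc converttoBinGo n 0 1 = converttoBinGo ((n.toNat : Nat) : Int) 0 1 := by rw [hn]
      _ = 0 + 1 * parseDigits (binChars n.toNat) := converttoBinGo_eq n.toNat 0 1
      _ = parseDigits (binChars n.toNat) := by ring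
  · rw [if_neg h, converttoBinGo, dif_neg h]
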